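-- pv_equiv track=rewrite | github.com/zhenyachess/Mathematical-methods-of-pattern-recognition | p_5_1.py | make_new_set
-- ===== SOURCE A (Python) =====
-- def make_new_set(lst, ds, SUPPORT):
-- 	result = []
-- 	for elem in lst: # Для фиксированной комбинации
-- 		test = list(elem) # Делаем из неё список из букв
-- 		cnt = 0 # Инициализируем счетчик
-- 		for i in range(len(ds)): # Проходим по строчкам датасета
-- 			check = True # Инициализируем проверку принадлежности комбинации строке
-- 			for t in test: # Для каждой буквы проверяем
-- 				if t not in ds[i]: # Если хотя бы одной буквы нет в строке
-- 					check = False #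
-- 					break
-- 			if check: cnt += 1 # Если все буквы комбинации были в строке, инкрементируем счетчик
-- 		if cnt >= SUPPORT: # Если частота удовлетворяет уровню поддержки
-- 			result.append([elem, cnt]) # Добавляем комбинацию и частоту
-- 	return dict(result)
-- ===== SOURCE B (Python) =====
-- def _build_index(ds):
--     # inverted index: item -> set of indices of the transactions containing it
--     index = {}
--     for i in range(len(ds)):
--         for t in ds[i]:
--             s = index.get(t, set())
--             s.add(i)
--             index[t] = s
--     return index
--
--
-- def _count(index, n, elem):
--     # support of elem = size of the intersection of its items' posting sets
--     test = list(elem)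
--     if not test:
--         return n  # every transaction contains the empty combination
--     common = index.get(test[0], set())
--     for t in test[1:]:
--         common = common & index.get(t, set())
--     return len(common)
--
--
-- def make_new_set(lst, ds, SUPPORT):
--     index = _build_index(ds)
--     result = {}
--     for elem in lst:
--         cnt = _count(index, len(ds), elem)
--         if cnt >= SUPPORT:
--             result[elem] = cnt
--     return result
-- ===== Notes on version B (the rewrite author's own statement) =====
-- stated objective: faster
-- what changed: Replaces the per-candidate rescan of the whole dataset (with a linear 'item in row' scan inside) by an inverted index built in one pass (item -> set of transaction indices); each candidate's support is then the size of the intersection of its items' posting sets.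
import Mathlib
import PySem

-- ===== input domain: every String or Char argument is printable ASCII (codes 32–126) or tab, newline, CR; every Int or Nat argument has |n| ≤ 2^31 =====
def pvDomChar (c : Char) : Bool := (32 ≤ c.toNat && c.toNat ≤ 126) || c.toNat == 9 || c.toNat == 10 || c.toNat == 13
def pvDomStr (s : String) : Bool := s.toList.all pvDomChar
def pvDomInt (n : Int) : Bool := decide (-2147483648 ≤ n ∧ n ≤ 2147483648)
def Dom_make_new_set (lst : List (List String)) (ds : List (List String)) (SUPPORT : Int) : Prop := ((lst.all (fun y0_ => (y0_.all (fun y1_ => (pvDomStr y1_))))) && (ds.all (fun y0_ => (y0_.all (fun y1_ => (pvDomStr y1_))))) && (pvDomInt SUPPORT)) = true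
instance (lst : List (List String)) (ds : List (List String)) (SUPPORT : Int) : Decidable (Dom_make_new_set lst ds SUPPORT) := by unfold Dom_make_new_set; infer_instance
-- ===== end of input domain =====

-- B replaces A's per-candidate rescan of the whole dataset by an inverted index
-- (item -> set of transaction indices) built once; support = size of the
-- intersection of the candidate's posting sets. Same return value everywhere.

-- ===== PORT A =====
-- inner loop 'for t in test: if t not in ds[i]: check = False; break'
def pvCheckA (test : List String) (row : List String) : Bool :=
  match test with
  | [] => true
  | t :: rest => if !(row.contains t) then false else pvCheckA rest row

def make_new_set (lst : List (List String)) (ds : List (List String)) (SUPPORT : Int) : List (List String × Int) :=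
  let result : List (List String × Int) :=
    lst.foldl (fun result elem =>
      let test := elem
      let cnt : Int :=
        (PySem.List.pyRange 0 (ds.length : Int) 1).foldl (fun cnt i =>
          if pvCheckA test (PySem.List.pyGetD ds i []) then cnt + 1 else cnt) 0
      if cnt ≥ SUPPORT then result ++ [(elem, cnt)] else result) []
  (PySem.Dict.ofList result).items

-- ===== PORT B =====
-- _build_index: for i in range(len(ds)): for t in ds[i]: index[t] = index.get(t, set()) with i added
def pvBuildIndex (ds : List (List String)) : PySem.Dict String (PySem.Set Int) :=
  (PySem.List.pyRange 0 (ds.length : Int) 1).foldl (fun index i =>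
    (PySem.List.pyGetD ds i []).foldl (fun index t =>
      index.insert t (PySem.Set.add (index.getD t PySem.Set.empty) i)) index) PySem.Dict.empty

-- _count: intersection of the posting sets of elem's items (n for the empty elem)
def pvCount (index : PySem.Dict String (PySem.Set Int)) (n : Int) (elem : List String) : Int :=
  match elem with
  | [] => n
  | t :: rest =>
    ((rest.foldl (fun common u => PySem.Set.inter common (index.getD u PySem.Set.empty))
      (index.getD t PySem.Set.empty)).length : Int)

def make_new_set_alt (lst : List (List String)) (ds : List (List String)) (SUPPORT : Int) : List (List String × Int) :=
  let index := pvBuildIndex ds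
  (lst.foldl (fun result elem =>
    let cnt := pvCount index (ds.length : Int) elem
    if cnt ≥ SUPPORT then result.insert elem cnt else result) PySem.Dict.empty).items

-- ===== PRECONDITION & SPEC =====
def Spec_make_new_set (lst : List (List String)) (ds : List (List String)) (SUPPORT : Int) (out : List (List String × Int)) : Prop := out = make_new_set_alt lst ds SUPPORT
instance (lst : List (List String)) (ds : List (List String)) (SUPPORT : Int) (out : List (List String × Int)) : Decidable (Spec_make_new_set lst ds SUPPORT out) := by unfold Spec_make_new_set; infer_instance

-- ===== CLAIM (what is proved, stated in full; the proofs are below) =====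
def Claim_equal_make_new_set : Prop := ∀ (lst : List (List String)) (ds : List (List String)) (SUPPORT : Int), Dom_make_new_set lst ds SUPPORT → Spec_make_new_set lst ds SUPPORT (make_new_set lst ds SUPPORT)

-- ===== LEMMAS AND PROOFS =====

-- A's break loop is List.all
lemma pvCheckA_eq_all (test row : List String) :
    pvCheckA test row = test.all (fun t => row.contains t) := by
  induction test with
  | nil => rfl
  | cons t rest ih =>
    rw [show pvCheckA (t :: rest) row
        = if !(row.contains t) then false else pvCheckA rest row from rfl,
      List.all_cons, ih]
    cases h : row.contains t <;> simp

-- effect of one row of the index-building loop on one posting set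
lemma pvBuild_row (row : List String) (i : Int) (d : PySem.Dict String (PySem.Set Int)) (u : String) :
    (row.foldl (fun d t => d.insert t (PySem.Set.add (d.getD t PySem.Set.empty) i)) d).getD u PySem.Set.empty
      = if row.contains u then PySem.Set.add (d.getD u PySem.Set.empty) i
        else d.getD u PySem.Set.empty := by
  induction row generalizing d with
  | nil => simp
  | cons t rest ih =>
    simp only [List.foldl_cons, ih, PySem.Dict.getD_insert]
    by_cases h : u = t
    · subst h
      cases hr : rest.contains u <;> simp
    · have hbe : (u == t) = false := by simp [h]
      rw [List.contains_cons, hbe, Bool.false_or]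
      simp [h]

-- the whole index-building loop: posting set of u = indices (in order) whose row contains u
lemma pvBuild_fold (ds : List (List String)) (L : List Int)
    (d : PySem.Dict String (PySem.Set Int)) (hnd : L.Nodup)
    (hinv : ∀ (v : String) (j : Int), j ∈ d.getD v PySem.Set.empty → j ∉ L) (u : String) :
    (L.foldl (fun d i =>
        (PySem.List.pyGetD ds i []).foldl (fun d t =>
          d.insert t (PySem.Set.add (d.getD t PySem.Set.empty) i)) d) d).getD u PySem.Set.empty
      = d.getD u PySem.Set.empty ++ L.filter (fun i => (PySem.List.pyGetD ds i []).contains u) := by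
  induction L generalizing d with
  | nil => simp
  | cons i rest ih =>
    simp only [List.foldl_cons]
    have hinv' : ∀ (v : String) (j : Int),
        j ∈ ((PySem.List.pyGetD ds i []).foldl (fun d t =>
          d.insert t (PySem.Set.add (d.getD t PySem.Set.empty) i)) d).getD v PySem.Set.empty → j ∉ rest := by
      intro v j hj
      rw [pvBuild_row] at hj
      by_cases hc : (PySem.List.pyGetD ds i []).contains v = true
      · rw [if_pos hc, PySem.Set.mem_add] at hj
        rcases hj with hj | rfl
        · exact fun hr => hinv v j hj (List.mem_cons_of_mem _ hr)
        · exact (List.nodup_cons.mp hnd).1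
      · rw [if_neg hc] at hj
        exact fun hr => hinv v j hj (List.mem_cons_of_mem _ hr)
    rw [ih _ (List.nodup_cons.mp hnd).2 hinv', pvBuild_row]
    have hni : i ∉ d.getD u PySem.Set.empty := fun h => hinv u i h (List.mem_cons_self ..)
    by_cases hc : (PySem.List.pyGetD ds i []).contains u = true
    · have hm : u ∈ PySem.List.pyGetD ds i [] := by simpa using hc
      rw [if_pos hc]
      rw [PySem.Set.add_of_not_mem hni]
      simp [hm, List.append_assoc]
    · have hm : u ∉ PySem.List.pyGetD ds i [] := by simpa using hc
      rw [if_neg hc]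
      simp [hm]

lemma pvRange_nodup (n : Nat) : (PySem.List.pyRange 0 (n : Int) 1).Nodup := by
  rw [PySem.List.pyRange_zero_natCast]
  exact (List.nodup_range).map (fun a b h => by exact_mod_cast h)

lemma pvBuildIndex_getD (ds : List (List String)) (u : String) :
    (pvBuildIndex ds).getD u PySem.Set.empty
      = (PySem.List.pyRange 0 (ds.length : Int) 1).filter
          (fun i => (PySem.List.pyGetD ds i []).contains u) := by
  unfold pvBuildIndex
  rw [pvBuild_fold ds _ _ (pvRange_nodup ds.length) (by simp) u]
  simp

-- intersection of two filters of the same duplicate-free base list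
lemma pvInter_filter (L : List Int) (p q : Int → Bool) :
    PySem.Set.inter (L.filter p) (L.filter q) = L.filter (fun x => p x && q x) := by
  show List.filter (fun x => (L.filter q).contains x) (L.filter p) = _
  rw [List.filter_filter]
  refine List.filter_congr ?_
  intro x hx
  have hc : (L.filter q).contains x = q x := by
    cases hq : q x <;> simp [List.mem_filter, hx, hq]
  rw [hc, Bool.and_comm]

-- the intersection loop over the remaining items
lemma pvCommon (ds : List (List String)) (rest : List String) (p0 : Int → Bool) :
    rest.foldl (fun common u => PySem.Set.inter common ((pvBuildIndex ds).getD u PySem.Set.empty))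
        ((PySem.List.pyRange 0 (ds.length : Int) 1).filter p0)
      = (PySem.List.pyRange 0 (ds.length : Int) 1).filter
          (fun i => p0 i && rest.all (fun u => (PySem.List.pyGetD ds i []).contains u)) := by
  induction rest generalizing p0 with
  | nil => simp
  | cons u rest ih =>
    rw [List.foldl_cons, pvBuildIndex_getD,
      pvInter_filter _, ih]
    refine List.filter_congr ?_
    intro x hx
    simp [List.all_cons, Bool.and_assoc]

-- B's per-candidate count equals A's per-candidate count
lemma pvCount_eq (ds : List (List String)) (elem : List String) :
    pvCount (pvBuildIndex ds) (ds.length : Int) elem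
      = (PySem.List.pyRange 0 (ds.length : Int) 1).foldl (fun cnt i =>
          if pvCheckA elem (PySem.List.pyGetD ds i []) then cnt + 1 else cnt) 0 := by
  rw [PySem.List.foldl_if_add_one (fun i => pvCheckA elem (PySem.List.pyGetD ds i []))]
  cases elem with
  | nil =>
    simp [pvCount, pvCheckA, List.countP_eq_length_filter]
  | cons t rest =>
    simp only [pvCount]
    rw [pvBuildIndex_getD, pvCommon]
    have : ∀ i, (pvCheckA (t :: rest) (PySem.List.pyGetD ds i []))
        = ((PySem.List.pyGetD ds i []).contains t
            && rest.all (fun u => (PySem.List.pyGetD ds i []).contains u)) := by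
      intro i; rw [pvCheckA_eq_all]; simp [List.all_cons]
    simp only [List.countP_eq_length_filter, this]
    simp

-- assembling the result: append-then-dict(…) equals conditional dict inserts
lemma pvAssemble (lst : List (List String)) (S : Int) (c : List String → Int) :
    (PySem.Dict.ofList (lst.foldl (fun r e => if c e ≥ S then r ++ [(e, c e)] else r) [])).items
      = (lst.foldl (fun r e => if c e ≥ S then PySem.Dict.insert r e (c e) else r)
          (PySem.Dict.empty : PySem.Dict (List String) Int)).items := by
  rw [PySem.List.foldl_append_ite (fun e => c e ≥ S) (fun e => (e, c e)),
    PySem.List.foldl_ite_eq_foldl_filter (fun e => c e ≥ S)]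
  simp [PySem.Dict.ofList, PySem.Dict.update, List.foldl_map]

lemma pvMain (lst ds : List (List String)) (SUPPORT : Int) :
    make_new_set lst ds SUPPORT = make_new_set_alt lst ds SUPPORT := by
  show (PySem.Dict.ofList (lst.foldl (fun r e =>
      if (PySem.List.pyRange 0 (ds.length : Int) 1).foldl (fun cnt i =>
          if pvCheckA e (PySem.List.pyGetD ds i []) then cnt + 1 else cnt) 0 ≥ SUPPORT
      then r ++ [(e, (PySem.List.pyRange 0 (ds.length : Int) 1).foldl (fun cnt i =>
          if pvCheckA e (PySem.List.pyGetD ds i []) then cnt + 1 else cnt) 0)] else r) [])).items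
    = (lst.foldl (fun r e =>
        if pvCount (pvBuildIndex ds) (ds.length : Int) e ≥ SUPPORT
        then PySem.Dict.insert r e (pvCount (pvBuildIndex ds) (ds.length : Int) e) else r)
        PySem.Dict.empty).items
  simp only [pvCount_eq]
  exact pvAssemble lst SUPPORT _

-- ===== VERDICT (by name: the statement is the Claim_ definition above) =====
theorem make_new_set_spec : Claim_equal_make_new_set := by
  intro lst ds SUPPORT _
  unfold Spec_make_new_set
  exact pvMain lst ds SUPPORT
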